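-- pv_equiv track=rewrite | github.com/fryanpan/rare_disease_benchmark | run_condition.py | extract_diagnoses
-- ===== SOURCE A (Python) =====
-- def extract_diagnoses(text: str) -> str:
--     """
--     Extract the numbered diagnosis list from model output.
--     Handles verbose outputs (e.g., from web-search conditions) by finding
--     the last occurrence of a numbered list.
--     """
--     lines = text.strip().split("\n")
--     # Find lines that look like "1. ...", "2. ...", etc.
--     diag_lines = []
--     in_list = False
--     for line in lines:
--         stripped = line.strip()
--         if stripped and stripped[0].isdigit() and (". " in stripped[:4] or stripped[1:3] in (". ", ") ")):
--             diag_lines.append(stripped)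
--             in_list = True
--         elif in_list and stripped:
--             # Reset if we encounter non-list content after the list starts
--             diag_lines = []
--             in_list = False
--
--     if diag_lines:
--         return "\n".join(diag_lines[:5])
--     return text.strip()
-- ===== SOURCE B (Python) =====
-- def extract_diagnoses(text: str) -> str:
--     """Reverse scan: walk lines bottom-up, skip blanks, collect the trailing
--     block of numbered-item lines, stop at the first other non-blank line."""
--     def _is_item(s: str) -> bool:
--         return bool(s) and s[0].isdigit() and (". " in s[:4] or s[1:3] in (". ", ") "))
--
--     body = text.strip()
--     lines = body.split("\n")
--     collected = []
--     for line in reversed(lines):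
--         s = line.strip()
--         if not s:
--             continue
--         if _is_item(s):
--             collected.append(s)
--         else:
--             break
--     if collected:
--         collected.reverse()
--         return "\n".join(collected[:5])
--     return body
-- ===== Notes on version B (the rewrite author's own statement) =====
-- stated objective: simpler
-- what changed: Replaces A's forward state machine (diag_lines accumulator with an in_list flag that resets on non-list content) by a single reverse scan from the last line that skips blanks, collects the trailing block of numbered lines and breaks at the first other non-blank line.
import Mathlib
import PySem

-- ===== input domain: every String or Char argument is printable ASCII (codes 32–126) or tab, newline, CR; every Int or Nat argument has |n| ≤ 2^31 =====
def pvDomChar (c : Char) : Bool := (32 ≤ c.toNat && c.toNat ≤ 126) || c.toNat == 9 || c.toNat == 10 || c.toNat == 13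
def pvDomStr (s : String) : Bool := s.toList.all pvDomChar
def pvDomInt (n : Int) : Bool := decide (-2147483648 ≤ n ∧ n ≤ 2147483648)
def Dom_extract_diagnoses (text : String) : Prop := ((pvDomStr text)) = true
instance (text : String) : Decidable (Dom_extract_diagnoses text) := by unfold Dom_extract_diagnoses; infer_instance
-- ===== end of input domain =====

-- B replaces A's forward state-machine (diag_lines + in_list reset) by a single reverse scan that
-- collects the trailing block of numbered lines; objective: simpler, no speed claim.

-- ===== PORT A =====
-- the Python test `stripped and stripped[0].isdigit() and (". " in stripped[:4] or stripped[1:3] in (". ", ") "))`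
-- (textually identical in A and in B's helper `_is_item`, so defined once)
def dgIsItem (s : List Char) : Bool :=
  !s.isEmpty &&
  ((PySem.List.pyGet? s 0).elim false PySem.Chars.isdigit) &&
  (PySem.Chars.isIn ['.', ' '] (PySem.List.slice s none (some 4)) ||
   (PySem.List.slice s (some 1) (some 3) == ['.', ' '] ||
    PySem.List.slice s (some 1) (some 3) == [')', ' ']))

-- one iteration of A's `for line in lines` loop, state = (diag_lines, in_list)
def dgStepA (st : List (List Char) × Bool) (line : List Char) : List (List Char) × Bool :=
  let stripped := PySem.Chars.strip line
  if dgIsItem stripped then (st.1 ++ [stripped], true)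
  else if st.2 && !stripped.isEmpty then ([], false)
  else st

def extract_diagnoses (text : String) : String :=
  let lines := PySem.Chars.splitOn (PySem.Chars.strip text.toList) ['\n']
  let r := lines.foldl dgStepA ([], false)
  if !r.1.isEmpty then
    String.ofList (PySem.Chars.join ['\n'] (PySem.List.slice r.1 none (some 5)))
  else String.ofList (PySem.Chars.strip text.toList)

-- ===== PORT B =====
-- B's reverse loop: argument is the reversed line list; skip blanks, collect items, break otherwise.
def dgCollect : List (List Char) → List (List Char)
  | [] => []
  | l :: rest =>
    let s := PySem.Chars.strip l
    if s.isEmpty then dgCollect rest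
    else if dgIsItem s then s :: dgCollect rest
    else []

def extract_diagnoses_alt (text : String) : String :=
  let body := PySem.Chars.strip text.toList
  let collected := dgCollect (PySem.Chars.splitOn body ['\n']).reverse
  if !collected.isEmpty then
    String.ofList (PySem.Chars.join ['\n'] (PySem.List.slice collected.reverse none (some 5)))
  else String.ofList body

-- ===== PRECONDITION & SPEC =====
def Spec_extract_diagnoses (text : String) (out : String) : Prop := out = extract_diagnoses_alt text
instance (text : String) (out : String) : Decidable (Spec_extract_diagnoses text out) := by unfold Spec_extract_diagnoses; infer_instance

-- ===== CLAIM (what is proved, stated in full; the proofs are below) =====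
def Claim_equal_extract_diagnoses : Prop := ∀ (text : String), Dom_extract_diagnoses text → Spec_extract_diagnoses text (extract_diagnoses text)

-- ===== LEMMAS AND PROOFS =====

lemma dgIsItem_not_empty {s : List Char} (h : dgIsItem s = true) : s.isEmpty = false := by
  unfold dgIsItem at h
  simp only [Bool.and_eq_true, Bool.not_eq_eq_eq_not, Bool.not_true] at h
  exact h.1.1

lemma dgCollect_cons (l : List Char) (rest : List (List Char)) :
    dgCollect (l :: rest) =
      (if (PySem.Chars.strip l).isEmpty then dgCollect rest
       else if dgIsItem (PySem.Chars.strip l) then PySem.Chars.strip l :: dgCollect rest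
       else []) := rfl

-- A's forward fold equals B's reverse collection: diag_lines is the collected block in original
-- order, and in_list is exactly "the collected block is nonempty".
lemma dg_fold_eq (ls : List (List Char)) :
    ls.foldl dgStepA ([], false) =
      ((dgCollect ls.reverse).reverse, !(dgCollect ls.reverse).isEmpty) := by
  induction ls using List.reverseRecOn with
  | nil => rfl
  | append_singleton ls l ih =>
    rw [List.foldl_append, ih, List.reverse_append]
    simp only [List.reverse_singleton, List.singleton_append]
    show dgStepA _ l = _
    unfold dgStepA
    rw [dgCollect_cons]
    by_cases hit : dgIsItem (PySem.Chars.strip l) = true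
    · simp [hit, dgIsItem_not_empty hit]
    · simp only [Bool.not_eq_true] at hit
      by_cases hb : (PySem.Chars.strip l).isEmpty = true
      · simp [hit, hb]
      · simp only [Bool.not_eq_true] at hb
        cases hcoll : (dgCollect ls.reverse).isEmpty <;> simp_all

-- ===== VERDICT (by name: the statement is the Claim_ definition above) =====
theorem extract_diagnoses_spec : Claim_equal_extract_diagnoses := by
  intro text _
  show extract_diagnoses text = extract_diagnoses_alt text
  unfold extract_diagnoses extract_diagnoses_alt
  simp only [dg_fold_eq]
  cases h : (dgCollect (PySem.Chars.splitOn (PySem.Chars.strip text.toList) ['\n']).reverse).isEmpty <;>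
    simp [h]
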